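-- pv_equiv track=rewrite | github.com/dpchen987/asr-data | extractor/video_subtitle_extractor.py | find_subtitle_area
-- ===== SOURCE A (Python) =====
-- def find_subtitle_area(areas):
--     grouped = set()
--     groups = []
--     for i in range(len(areas)):
--         if i in grouped:
--             continue
--         grouped.add(i)
--         a = areas[i]
--         group = [a]
--         half_height = a[2] * 0.5
--         for j in range(i+1, len(areas)):
--             if j in grouped:
--                 continue
--             b = areas[j]
--             if b[-1] == 'left':
--                 # 居左，则起点变化不大
--                 near_by = ((abs(a[0]-b[0]) < half_height) and
--                         (abs(a[1]-b[1]) < half_height) and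
--                         (abs(a[2]-b[2]) < a[2]*0.3))
--             elif b[-1] == 'middle':
--                 # 居中，则中点变化不大
--                 middle_a = (a[3] + a[0]) / 2
--                 middle_b = (b[3] + b[0]) / 2
--                 near_by = ((abs(middle_a-middle_b) < half_height) and
--                         (abs(a[1]-b[1]) < half_height) and
--                         (abs(a[2]-b[2]) < a[2]*0.3))
--             else:
--                 # 居右，则尾点变化不大
--                 near_by = ((abs(a[3]-b[3]) < half_height) and
--                         (abs(a[1]-b[1]) < half_height) and
--                         (abs(a[2]-b[2]) < a[2]*0.3))
--             if near_by:
--                 group.append(b)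
--                 grouped.add(j)
--         groups.append(group)
--     # 取x_end变化最多的group
--     group_count = {}
--     for i, group in enumerate(groups):
--         count = 0
--         for j in range(1, len(group)):
--             if abs(group[j][3] - group[j-1][3]) >= 1 * group[j][2]:
--                 # x end 差值大于1个字高
--                 count += 1
--         group_count[i] = count
--     zz = sorted(group_count.items(), key=lambda a: a[1], reverse=True)
--     idx = zz[0][0]
--     best = groups[idx]
--     return best
-- ===== SOURCE B (Python) =====
-- def find_subtitle_area(areas):
--     # Integer-exact version of A's float proximity tests (|ints| <= 2^31, so
--     # A's float comparisons are exact and equivalent to these):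
--     def near_by(a, b):
--         if 2 * abs(a[1] - b[1]) >= a[2] or 10 * abs(a[2] - b[2]) >= 3 * a[2]:
--             return False
--         if b[-1] == 'left':
--             return 2 * abs(a[0] - b[0]) < a[2]
--         if b[-1] == 'middle':
--             return abs((a[3] + a[0]) - (b[3] + b[0])) < a[2]
--         return 2 * abs(a[3] - b[3]) < a[2]
--
--     best, best_count = None, -1
--     rest = list(areas)
--     while rest:
--         a, tail = rest[0], rest[1:]
--         group, rest = [a], []
--         for b in tail:
--             (group if near_by(a, b) else rest).append(b)
--         count = sum(1 for prev, cur in zip(group, group[1:])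
--                     if abs(cur[3] - prev[3]) >= cur[2])
--         if count > best_count:
--             best, best_count = group, count
--     if best is None:
--         raise IndexError('find_subtitle_area: empty areas')
--     return best
-- ===== Notes on version B (the rewrite author's own statement) =====
-- stated objective: simpler
-- what changed: B drops A's index-set bookkeeping and the count dict + reverse stable sort: it recurses on the list of still-ungrouped areas, partitioning the tail of each seed into its group and the leftovers, and keeps a running best group under strict '>' (which reproduces A's first-max tie-breaking); A's exact float proximity tests are replaced by equivalent integer comparisons.
import Mathlib
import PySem

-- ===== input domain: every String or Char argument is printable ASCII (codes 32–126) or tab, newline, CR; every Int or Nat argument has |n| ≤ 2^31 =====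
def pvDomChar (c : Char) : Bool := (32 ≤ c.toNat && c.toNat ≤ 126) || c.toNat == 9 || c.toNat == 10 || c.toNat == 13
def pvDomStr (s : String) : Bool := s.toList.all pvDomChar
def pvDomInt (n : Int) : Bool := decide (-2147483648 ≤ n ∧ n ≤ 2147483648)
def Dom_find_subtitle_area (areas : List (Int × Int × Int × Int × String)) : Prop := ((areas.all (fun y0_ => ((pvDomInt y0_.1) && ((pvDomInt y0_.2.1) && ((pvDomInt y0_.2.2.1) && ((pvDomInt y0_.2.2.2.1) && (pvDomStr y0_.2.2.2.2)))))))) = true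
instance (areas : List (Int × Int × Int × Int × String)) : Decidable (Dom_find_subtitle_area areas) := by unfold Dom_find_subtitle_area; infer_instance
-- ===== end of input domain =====

-- B replaces A's index-set grouping by a partition-based recursion with the best
-- group selected on the fly (strict '>' keeps the earliest tie, exactly like A's
-- stable reverse sort of the count dict); same asymptotic cost, simpler code.
-- A's float proximity tests (x*0.5, x*0.3, /2) are exact for |ints| ≤ 2^31 and are
-- ported as the equivalent integer comparisons (2*|d| < h, 10*|d| < 3*h, sums).

abbrev pvArea := Int × Int × Int × Int × String

def pvDflt : pvArea := (0, 0, 0, 0, "")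

-- ===== PORT A =====
-- near_by of A: branch on the alignment string, conjunction of three proximity
-- tests per branch (integer forms of A's exact float comparisons, see header).
def pvNearA (a b : pvArea) : Bool :=
  if b.2.2.2.2 = "left" then
    decide (2 * |a.1 - b.1| < a.2.2.1 ∧ 2 * |a.2.1 - b.2.1| < a.2.2.1 ∧
            10 * |a.2.2.1 - b.2.2.1| < 3 * a.2.2.1)
  else if b.2.2.2.2 = "middle" then
    decide (|(a.2.2.2.1 + a.1) - (b.2.2.2.1 + b.1)| < a.2.2.1 ∧ 2 * |a.2.1 - b.2.1| < a.2.2.1 ∧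
            10 * |a.2.2.1 - b.2.2.1| < 3 * a.2.2.1)
  else
    decide (2 * |a.2.2.2.1 - b.2.2.2.1| < a.2.2.1 ∧ 2 * |a.2.1 - b.2.1| < a.2.2.1 ∧
            10 * |a.2.2.1 - b.2.2.1| < 3 * a.2.2.1)

-- abs(group[j][3] - group[j-1][3]) >= 1 * group[j][2]
def pvVarA (prev cur : pvArea) : Bool := decide (1 * cur.2.2.1 ≤ |cur.2.2.2.1 - prev.2.2.2.1|)

-- body of A's inner j-loop (indices j are always in range, so pyGetD's default is never used)
def pvInnerA (areas : List pvArea) (a : pvArea) (st2 : PySem.Set Int × List pvArea) (j : Int) :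
    PySem.Set Int × List pvArea :=
  if st2.1.contains j then st2
  else
    let b := PySem.List.pyGetD areas j pvDflt
    if pvNearA a b then (st2.1.add j, st2.2 ++ [b]) else st2

-- body of A's outer i-loop
def pvOuterA (areas : List pvArea) (st : PySem.Set Int × List (List pvArea)) (i : Int) :
    PySem.Set Int × List (List pvArea) :=
  if st.1.contains i then st
  else
    let a := PySem.List.pyGetD areas i pvDflt
    let inner := (PySem.List.pyRange (i + 1) (PySem.List.len areas)).foldl (pvInnerA areas a)
      (st.1.add i, [a])
    (inner.1, st.2 ++ [inner.2])

-- the 'count' loop of A over j in range(1, len(group))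
def pvCountA (group : List pvArea) : Int :=
  (PySem.List.pyRange 1 (PySem.List.len group)).foldl
    (fun c j => if pvVarA (PySem.List.pyGetD group (j - 1) pvDflt)
                         (PySem.List.pyGetD group j pvDflt) then c + 1 else c) 0

def find_subtitle_area (areas : List (Int × Int × Int × Int × String)) :
    List (Int × Int × Int × Int × String) :=
  let st := (PySem.List.pyRange 0 (PySem.List.len areas)).foldl (pvOuterA areas)
    (PySem.Set.empty, [])
  let group_count := (PySem.List.enumerate st.2).foldl
    (fun (d : PySem.Dict Int Int) p => d.insert p.1 (pvCountA p.2)) PySem.Dict.empty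
  let zz := PySem.List.sorted group_count.items (fun q => q.2) true
  match zz with
  | [] => []  -- Python raises IndexError here (only when areas = []); excluded by Pre_
  | q :: _ => PySem.List.pyGetD st.2 q.1 []

-- ===== PORT B =====
-- near_by of B: early exit on the two shared tests, then the alignment-specific one
def pvNearB (a b : pvArea) : Bool :=
  if a.2.2.1 ≤ 2 * |a.2.1 - b.2.1| ∨ 3 * a.2.2.1 ≤ 10 * |a.2.2.1 - b.2.2.1| then false
  else if b.2.2.2.2 = "left" then decide (2 * |a.1 - b.1| < a.2.2.1)
  else if b.2.2.2.2 = "middle" then decide (|(a.2.2.2.1 + a.1) - (b.2.2.2.1 + b.1)| < a.2.2.1)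
  else decide (2 * |a.2.2.2.1 - b.2.2.2.1| < a.2.2.1)

def pvVarB (prev cur : pvArea) : Bool := decide (cur.2.2.1 ≤ |cur.2.2.2.1 - prev.2.2.2.1|)

-- sum(1 for prev, cur in zip(group, group[1:]) if ...)
def pvCountB (group : List pvArea) : Int :=
  ((group.zip (group.drop 1)).countP (fun q => pvVarB q.1 q.2) : Int)

-- B's while loop: take the first remaining area, partition the rest into its group
-- and the leftovers, keep the group if its count strictly beats the running best.
def pvLoopB (rest : List pvArea) (st : Option (List pvArea) × Int) : List pvArea :=
  match rest with
  | [] => st.1.getD []  -- Python B raises IndexError when no group was ever seen (areas = [])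
  | a :: tail =>
      let p := tail.partition (fun b => pvNearB a b)
      let group := a :: p.1
      let c := pvCountB group
      pvLoopB p.2 (if c > st.2 then (some group, c) else st)
termination_by rest.length
decreasing_by
  simp only [List.partition_eq_filter_filter]
  exact Nat.lt_succ_of_le (List.length_filter_le _ _)

def find_subtitle_area_alt (areas : List (Int × Int × Int × Int × String)) :
    List (Int × Int × Int × Int × String) :=
  pvLoopB areas (none, -1)

-- ===== PRECONDITION & SPEC =====
-- Pre_ excludes only the empty list, on which A raises IndexError (zz[0] on an empty list).
def Pre_find_subtitle_area (areas : List (Int × Int × Int × Int × String)) : Prop := areas ≠ []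
instance (areas : List (Int × Int × Int × Int × String)) : Decidable (Pre_find_subtitle_area areas) := by unfold Pre_find_subtitle_area; infer_instance

def pvWitness_find_subtitle_area : (List (Int × Int × Int × Int × String)) := [(0, 0, 10, 5, "left")]

def Spec_find_subtitle_area (areas : List (Int × Int × Int × Int × String)) (out : List (Int × Int × Int × Int × String)) : Prop := out = find_subtitle_area_alt areas
instance (areas : List (Int × Int × Int × Int × String)) (out : List (Int × Int × Int × Int × String)) : Decidable (Spec_find_subtitle_area areas out) := by unfold Spec_find_subtitle_area; infer_instance

-- ===== CLAIM (what is proved, stated in full; the proofs are below) =====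
def Claim_equal_find_subtitle_area : Prop := ∀ (areas : List (Int × Int × Int × Int × String)), Dom_find_subtitle_area areas → Pre_find_subtitle_area areas → Spec_find_subtitle_area areas (find_subtitle_area areas)

-- ===== LEMMAS AND PROOFS =====

theorem pvNear_eq (a b : pvArea) : pvNearB a b = pvNearA a b := by
  unfold pvNearA pvNearB
  split_ifs <;> simp_all <;> omega

-- value-level grouping: the groups A and B both build, on the list of still-ungrouped areas
def pvGroups (l : List pvArea) : List (List pvArea) :=
  match l with
  | [] => []
  | a :: tl =>
      (a :: tl.filter (fun b => pvNearA a b)) :: pvGroups (tl.filter (fun b => !pvNearA a b))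
termination_by l.length
decreasing_by
  have h := List.length_filter_le (fun x : {b // b ∈ tl} => !pvNearA a x.1) tl.attach
  simp [List.unattach] at *
  omega

-- running best over a list of groups (B's selection, as a fold)
def pvSelSt (gs : List (List pvArea)) (st : Option (List pvArea) × Int) :
    Option (List pvArea) × Int :=
  gs.foldl (fun st g => if pvCountB g > st.2 then (some g, pvCountB g) else st) st

theorem pvLoopB_eq_sel_aux : ∀ (n : Nat) (l : List pvArea), l.length ≤ n →
    ∀ st, pvLoopB l st = (pvSelSt (pvGroups l) st).1.getD [] := by
  intro n
  induction n with
  | zero =>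
      intro l hl st
      have : l = [] := List.eq_nil_of_length_eq_zero (Nat.le_zero.mp hl)
      subst this
      simp [pvLoopB, pvGroups, pvSelSt]
  | succ n ih =>
      intro l hl st
      match l with
      | [] => simp [pvLoopB, pvGroups, pvSelSt]
      | a :: tl =>
          rw [pvLoopB, pvGroups]
          simp only [List.partition_eq_filter_filter]
          rw [ih (tl.filter (not ∘ fun b => pvNearB a b))
              (le_trans (List.length_filter_le _ _) (Nat.le_of_succ_le_succ hl))]
          simp only [pvSelSt, List.foldl_cons]
          simp [pvNear_eq, Function.comp_def]

theorem pvLoopB_eq_sel (l : List pvArea) (st : Option (List pvArea) × Int) :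
    pvLoopB l st = (pvSelSt (pvGroups l) st).1.getD [] :=
  pvLoopB_eq_sel_aux l.length l le_rfl st

-- the remaining (not yet grouped) areas, by index
def pvRem (areas : List pvArea) (g : PySem.Set Int) (i : Int) : List pvArea :=
  ((PySem.List.pyRange i (PySem.List.len areas)).filter (fun j => !g.contains j)).map
    (fun j => PySem.List.pyGetD areas j pvDflt)

theorem pvRange_nil {a b : Int} (h : b ≤ a) : PySem.List.pyRange a b = [] := by
  rw [PySem.List.pyRange_of_pos a b (by norm_num)]
  simp [if_neg (not_lt.mpr h)]

theorem pvRange_nodup (a b : Int) : (PySem.List.pyRange a b).Nodup := by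
  rw [PySem.List.pyRange_of_pos a b (by norm_num)]
  exact (List.nodup_range).map (fun x y hxy => by omega)

theorem pvInnerA_spec (areas : List pvArea) (a : pvArea) (js : List Int)
    (hnd : js.Nodup) (g : PySem.Set Int) (group : List pvArea) :
    js.foldl (pvInnerA areas a) (g, group) =
      (g ++ js.filter (fun j => !g.contains j &&
          pvNearA a (PySem.List.pyGetD areas j pvDflt)),
       group ++ (js.filter (fun j => !g.contains j &&
          pvNearA a (PySem.List.pyGetD areas j pvDflt))).map
          (fun j => PySem.List.pyGetD areas j pvDflt)) := by
  induction js generalizing g group with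
  | nil => simp
  | cons j tl ih =>
      have hj : j ∉ tl := (List.nodup_cons.mp hnd).1
      have htl : tl.Nodup := (List.nodup_cons.mp hnd).2
      rw [List.foldl_cons, List.filter_cons]
      by_cases hjg : j ∈ g
      · have hstep : pvInnerA areas a (g, group) j = (g, group) := by
          simp [pvInnerA, PySem.Set.contains, hjg]
        rw [hstep]
        have hcond : (!g.contains j && pvNearA a (PySem.List.pyGetD areas j pvDflt)) = false := by
          simp [PySem.Set.contains, List.contains_eq_mem, hjg]
        simp only [hcond, Bool.false_eq_true, if_neg (by exact fun h => h)]
        exact ih htl g group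
      · by_cases hn : pvNearA a (PySem.List.pyGetD areas j pvDflt) = true
        · have hstep : pvInnerA areas a (g, group) j
              = (g ++ [j], group ++ [PySem.List.pyGetD areas j pvDflt]) := by
            simp [pvInnerA, PySem.Set.add, PySem.Set.contains, hjg, hn]
          rw [hstep, ih htl (g ++ [j]) (group ++ [PySem.List.pyGetD areas j pvDflt])]
          have hfc : tl.filter (fun x => !(g ++ [j] : PySem.Set Int).contains x &&
                pvNearA a (PySem.List.pyGetD areas x pvDflt))
              = tl.filter (fun x => !g.contains x &&
                pvNearA a (PySem.List.pyGetD areas x pvDflt)) := by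
            apply List.filter_congr
            intro x hx
            have hxj : x ≠ j := fun h => hj (h ▸ hx)
            simp [PySem.Set.contains, List.contains_eq_mem, hxj]
          rw [hfc]
          have hcond : (!g.contains j && pvNearA a (PySem.List.pyGetD areas j pvDflt)) = true := by
            simp [PySem.Set.contains, List.contains_eq_mem, hjg, hn]
          simp [hjg, hn, List.append_assoc]
        · have hstep : pvInnerA areas a (g, group) j = (g, group) := by
            simp [pvInnerA, PySem.Set.contains, hjg, hn]
          rw [hstep]
          have hcond : (!g.contains j && pvNearA a (PySem.List.pyGetD areas j pvDflt)) = false := by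
            simp [hn]
          simp only [hcond, Bool.false_eq_true, if_neg (by exact fun h => h)]
          exact ih htl g group

theorem pvOuterA_spec (areas : List pvArea) :
    ∀ (k : Nat) (i : Int) (g : PySem.Set Int) (gs : List (List pvArea)),
    (PySem.List.len areas - i).toNat ≤ k →
    ((PySem.List.pyRange i (PySem.List.len areas)).foldl (pvOuterA areas) (g, gs)).2
      = gs ++ pvGroups (pvRem areas g i) := by
  intro k
  induction k with
  | zero =>
      intro i g gs hk
      have hni : PySem.List.len areas ≤ i := by omega
      have h0 : PySem.List.pyRange i (PySem.List.len areas) = [] := pvRange_nil hni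
      rw [h0]
      unfold pvRem
      rw [h0]
      simp only [List.filter_nil, List.map_nil, List.foldl_nil]
      rw [pvGroups]
      simp
  | succ k ih =>
      intro i g gs hk
      by_cases hlt : i < PySem.List.len areas
      · rw [PySem.List.pyRange_one_cons hlt, List.foldl_cons]
        by_cases hig : i ∈ g
        · have hstep : pvOuterA areas (g, gs) i = (g, gs) := by
            simp [pvOuterA, PySem.Set.contains, List.contains_eq_mem, hig]
          rw [hstep, ih (i + 1) g gs (by omega)]
          have hrem : pvRem areas g i = pvRem areas g (i + 1) := by
            unfold pvRem
            rw [PySem.List.pyRange_one_cons hlt, List.filter_cons]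
            simp [PySem.Set.contains, List.contains_eq_mem, hig]
          rw [hrem]
        · have hiR : ∀ j ∈ PySem.List.pyRange (i + 1) (PySem.List.len areas), j ≠ i := by
            intro j hj
            have := (PySem.List.mem_pyRange_one.mp hj).1
            omega
          have hstep : pvOuterA areas (g, gs) i =
              (((PySem.List.pyRange (i + 1) (PySem.List.len areas)).foldl
                  (pvInnerA areas (PySem.List.pyGetD areas i pvDflt))
                  (g ++ [i], [PySem.List.pyGetD areas i pvDflt])).1,
               gs ++ [((PySem.List.pyRange (i + 1) (PySem.List.len areas)).foldl
                  (pvInnerA areas (PySem.List.pyGetD areas i pvDflt))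
                  (g ++ [i], [PySem.List.pyGetD areas i pvDflt])).2]) := by
            simp [pvOuterA, PySem.Set.add, PySem.Set.contains, List.contains_eq_mem, hig]
          rw [hstep,
            pvInnerA_spec areas (PySem.List.pyGetD areas i pvDflt)
              (PySem.List.pyRange (i + 1) (PySem.List.len areas)) (pvRange_nodup _ _)
              (g ++ [i]) [PySem.List.pyGetD areas i pvDflt]]
          rw [ih (i + 1) _ _ (by omega)]
          -- the filter over the (i+1)-range does not see the index i
          have hkeep : (PySem.List.pyRange (i + 1) (PySem.List.len areas)).filter
                (fun j => !(g ++ [i] : PySem.Set Int).contains j &&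
                  pvNearA (PySem.List.pyGetD areas i pvDflt) (PySem.List.pyGetD areas j pvDflt))
              = (PySem.List.pyRange (i + 1) (PySem.List.len areas)).filter
                (fun j => !g.contains j &&
                  pvNearA (PySem.List.pyGetD areas i pvDflt) (PySem.List.pyGetD areas j pvDflt)) := by
            apply List.filter_congr
            intro j hj
            simp [PySem.Set.contains, List.contains_eq_mem, hiR j hj]
          rw [hkeep]
          -- the remaining areas at i are the current one followed by those at i+1
          have hremi : pvRem areas g i
              = PySem.List.pyGetD areas i pvDflt :: pvRem areas g (i + 1) := by
            unfold pvRem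
            rw [PySem.List.pyRange_one_cons hlt, List.filter_cons]
            simp [PySem.Set.contains, List.contains_eq_mem, hig]
          -- the group built from index i, on the value level
          have hgrp : ((PySem.List.pyRange (i + 1) (PySem.List.len areas)).filter
                (fun j => !g.contains j &&
                  pvNearA (PySem.List.pyGetD areas i pvDflt) (PySem.List.pyGetD areas j pvDflt))).map
                (fun j => PySem.List.pyGetD areas j pvDflt)
              = (pvRem areas g (i + 1)).filter
                  (fun b => pvNearA (PySem.List.pyGetD areas i pvDflt) b) := by
            unfold pvRem
            rw [List.filter_map, List.filter_filter]
            congr 1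
            apply List.filter_congr
            intro j hj
            simp [Function.comp, Bool.and_comm]
          -- the set after the inner loop leaves exactly the non-near areas for later rounds
          have hrest : pvRem areas
                ((g ++ [i]) ++ (PySem.List.pyRange (i + 1) (PySem.List.len areas)).filter
                  (fun j => !g.contains j &&
                    pvNearA (PySem.List.pyGetD areas i pvDflt) (PySem.List.pyGetD areas j pvDflt)))
                (i + 1)
              = (pvRem areas g (i + 1)).filter
                  (fun b => !pvNearA (PySem.List.pyGetD areas i pvDflt) b) := by
            unfold pvRem
            rw [List.filter_map, List.filter_filter]
            congr 1
            apply List.filter_congr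
            intro j hj
            by_cases hjg : j ∈ g
            · simp [PySem.Set.contains, List.contains_eq_mem, hjg]
            · have hb := PySem.List.mem_pyRange_one.mp hj
              simp only [PySem.List.len] at hb
              simp [PySem.Set.contains, List.contains_eq_mem, hjg, hiR j hj, Function.comp,
                List.mem_filter]
              intro h
              exact absurd h (by omega)
          rw [hrest, hremi, pvGroups]
          simp only [PySem.Set.contains, List.contains_eq_mem, PySem.List.len] at hgrp
          simp [hgrp, List.append_assoc]
      · have hni : PySem.List.len areas ≤ i := by omega
        have h0 : PySem.List.pyRange i (PySem.List.len areas) = [] := pvRange_nil hni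
        rw [h0]
        unfold pvRem
        rw [h0]
        simp only [List.filter_nil, List.map_nil, List.foldl_nil]
        rw [pvGroups]
        simp

-- count over indices (A) = count over adjacent pairs (B)
theorem pvZip_eq (l : List pvArea) :
    l.zip (l.drop 1) = (List.range (l.length - 1)).map
      (fun k => (l.getD k pvDflt, l.getD (k + 1) pvDflt)) := by
  apply List.ext_getElem
  · simp only [List.length_zip, List.length_drop, List.length_map, List.length_range]
    omega
  · intro k h1 h2
    have hk : k < l.length - 1 := by simp [List.length_zip] at h1; omega
    simp [List.getElem_zip, (by omega : k < l.length), (by omega : k + 1 < l.length)]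

theorem pvCount_eq (group : List pvArea) : pvCountA group = pvCountB group := by
  unfold pvCountA pvCountB
  rw [PySem.List.foldl_count_if]
  simp only [zero_add]
  by_cases hlen : group.length ≤ 1
  · have h0 : PySem.List.pyRange 1 (PySem.List.len group) = [] := by
      apply pvRange_nil
      simp only [PySem.List.len]
      omega
    rw [h0]
    match group, hlen with
    | [], _ => simp
    | [x], _ => simp
  · have hpos : (1 : Int) < PySem.List.len group := by
      have : PySem.List.len group = (group.length : Int) := rfl
      omega
    rw [PySem.List.pyRange_of_pos 1 (PySem.List.len group) (by norm_num), if_pos hpos]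
    have hM : ((PySem.List.len group - 1 + 1 - 1) / 1).toNat = group.length - 1 := by
      have : PySem.List.len group = (group.length : Int) := rfl
      omega
    rw [hM, List.countP_map, pvZip_eq, List.countP_map]
    congr 1
    apply List.countP_congr
    intro k hk
    have hk' : k < group.length - 1 := List.mem_range.mp hk
    have e2 : (1 + 1 * (k : Int)) = (((k + 1 : Nat) : Nat) : Int) := by omega
    simp only [Function.comp, e2, PySem.List.pyGetD_natCast]
    simp [pvVarA, pvVarB]

-- head of the stable descending sort = running strict max
def pvMaxStep (r : Option (Int × Int)) (q : Int × Int) : Option (Int × Int) :=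
  match r with
  | none => some q
  | some m => if m.2 < q.2 then some q else r

theorem pvInsertBy_head (before : (Int × Int) → (Int × Int) → Bool) (x : Int × Int)
    (ys : List (Int × Int)) :
    (PySem.List.insertBy before x ys).head? =
      some (match ys with | [] => x | y :: _ => if before x y then x else y) := by
  cases ys with
  | nil => simp [PySem.List.insertBy]
  | cons y ys =>
      simp only [PySem.List.insertBy]
      split <;> simp_all

theorem pvFoldl_insert_head (xs : List (Int × Int)) : ∀ (acc : List (Int × Int)),
    ((xs.foldl (fun acc x => PySem.List.insertBy (fun a b => decide (b.2 < a.2)) x acc) acc).head?)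
      = xs.foldl pvMaxStep acc.head? := by
  induction xs with
  | nil => intro acc; rfl
  | cons x xs ih =>
      intro acc
      rw [List.foldl_cons, List.foldl_cons, ih]
      congr 1
      cases acc with
      | nil => rfl
      | cons y ys =>
          rw [pvInsertBy_head]
          simp only [List.head?_cons, pvMaxStep]
          split_ifs <;> simp_all

theorem pvSorted_rev_head (xs : List (Int × Int)) :
    (PySem.List.sorted xs (fun q => q.2) true).head? = xs.foldl pvMaxStep none := by
  rw [PySem.List.sorted_rev_eq_foldl_insertBy]
  exact pvFoldl_insert_head xs []

-- correspondence between A's running max over (index, count) pairs and B's over groups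
def pvRel (full : List (List pvArea)) :
    Option (Int × Int) → Option (List pvArea) × Int → Prop
  | none, st => st = (none, -1)
  | some m, st => st.2 = m.2 ∧ st.1 = some (PySem.List.pyGetD full m.1 [])

theorem pvSel_corr (full : List (List pvArea)) :
    ∀ (gs pre : List (List pvArea)), full = pre ++ gs →
    ∀ (accP : Option (Int × Int)) (accB : Option (List pvArea) × Int),
    pvRel full accP accB →
    pvRel full
      (((PySem.List.enumerate gs (pre.length : Int)).map
          (fun p => (p.1, pvCountA p.2))).foldl pvMaxStep accP)
      (pvSelSt gs accB) := by
  intro gs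
  induction gs with
  | nil =>
      intro pre hfull accP accB hrel
      simpa [pvSelSt, PySem.List.enumerate] using hrel
  | cons g tl ih =>
      intro pre hfull accP accB hrel
      rw [PySem.List.enumerate_cons, List.map_cons, List.foldl_cons]
      have hsel : pvSelSt (g :: tl) accB
          = pvSelSt tl (if pvCountB g > accB.2 then (some g, pvCountB g) else accB) := by
        simp [pvSelSt]
      rw [hsel]
      have hlook : PySem.List.pyGetD full ((pre.length : Nat) : Int) [] = g := by
        rw [PySem.List.pyGetD_natCast, hfull]
        rw [List.getD_eq_getElem _ _ (by simp)]
        simp [List.getElem_append_right (Nat.le_refl pre.length)]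
      have hcnt : pvCountB g = pvCountA g := (pvCount_eq g).symm
      have hnonneg : (0 : Int) ≤ pvCountB g := by
        unfold pvCountB
        positivity
      have hnext : full = (pre ++ [g]) ++ tl := by
        rw [hfull, List.append_assoc]
        rfl
      have hlen : (((pre ++ [g]).length : Nat) : Int) = (pre.length : Int) + 1 := by
        simp
      cases accP with
      | none =>
          have hB : accB = (none, -1) := hrel
          rw [hB]
          have hgt : pvCountB g > (-1 : Int) := by omega
          simp only [pvMaxStep, if_pos hgt, gt_iff_lt]
          have := ih (pre ++ [g]) hnext (some ((pre.length : Int), pvCountA g))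
            (some g, pvCountB g) (by exact ⟨hcnt, by rw [hlook]⟩)
          rw [hlen] at this
          simpa using this
      | some m =>
          obtain ⟨hc, hb⟩ : accB.2 = m.2 ∧ accB.1 = some (PySem.List.pyGetD full m.1 []) := hrel
          by_cases hgt : m.2 < pvCountA g
          · have hgt' : pvCountB g > accB.2 := by omega
            simp only [pvMaxStep, if_pos hgt, gt_iff_lt, hgt']
            have := ih (pre ++ [g]) hnext (some ((pre.length : Int), pvCountA g))
              (some g, pvCountB g) (by exact ⟨hcnt, by rw [hlook]⟩)
            rw [hlen] at this
            simpa [hgt'] using this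
          · have hgt' : ¬ (pvCountB g > accB.2) := by omega
            simp only [pvMaxStep, if_neg hgt, gt_iff_lt]
            have := ih (pre ++ [g]) hnext (some m) accB ⟨hc, hb⟩
            rw [hlen] at this
            simpa [hgt'] using this

-- the count dict has exactly the pairs (i, count of groups[i]), in order
theorem pvDict_spec :
    ∀ (l : List (Int × List pvArea)) (d : PySem.Dict Int Int),
    (∀ p ∈ l, d.contains p.1 = false) → (l.map (·.1)).Nodup →
    (l.foldl (fun d p => d.insert p.1 (pvCountA p.2)) d).items
      = d.items ++ l.map (fun p => (p.1, pvCountA p.2)) := by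
  intro l
  induction l with
  | nil => intro d _ _; simp
  | cons p tl ih =>
      intro d hfresh hnd
      rw [List.foldl_cons]
      have hp : d.contains p.1 = false := hfresh p (List.mem_cons_self)
      have hins : (d.insert p.1 (pvCountA p.2)).items = d.items ++ [(p.1, pvCountA p.2)] := by
        rw [PySem.Dict.items_insert, if_neg (by simp [hp])]
      have hnd' := hnd
      rw [List.map_cons, List.nodup_cons] at hnd'
      have hfresh' : ∀ q ∈ tl, (d.insert p.1 (pvCountA p.2)).contains q.1 = false := by
        intro q hq
        have hq1 : q.1 ≠ p.1 := by
          intro h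
          apply hnd'.1
          rw [← h]
          simpa using List.mem_map_of_mem (f := fun x => x.1) hq
        simp only [PySem.Dict.contains, hins, List.any_append]
        have hc := hfresh q (List.mem_cons_of_mem p hq)
        simp only [PySem.Dict.contains] at hc
        simp [hc, Ne.symm hq1]
      rw [ih _ hfresh' hnd'.2, hins]
      simp

-- ===== VERDICT (by name: the statement is the Claim_ definition above) =====
theorem find_subtitle_area_spec : Claim_equal_find_subtitle_area := by
  intro areas _ hpre
  unfold Spec_find_subtitle_area find_subtitle_area_alt
  rw [pvLoopB_eq_sel]
  have hgroups : ((PySem.List.pyRange 0 (PySem.List.len areas)).foldl (pvOuterA areas)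
      (PySem.Set.empty, [])).2 = pvGroups areas := by
    rw [pvOuterA_spec areas (PySem.List.len areas - 0).toNat 0 PySem.Set.empty [] le_rfl]
    have hrem : pvRem areas PySem.Set.empty 0 = areas := by
      unfold pvRem
      have hf : (PySem.List.pyRange 0 (PySem.List.len areas)).filter
          (fun j => !(PySem.Set.empty : PySem.Set Int).contains j)
          = PySem.List.pyRange 0 (PySem.List.len areas) := by
        apply List.filter_eq_self.mpr
        intro j _
        simp [PySem.Set.empty, PySem.Set.contains]
      rw [hf]
      exact PySem.List.map_pyGetD_pyRange_zero areas pvDflt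
    rw [hrem]
    rfl
  simp only [find_subtitle_area]
  rw [hgroups]
  have hfresh : ∀ p ∈ PySem.List.enumerate (pvGroups areas),
      (PySem.Dict.empty : PySem.Dict Int Int).contains p.1 = false := by
    intro p _
    simp [PySem.Dict.contains, PySem.Dict.empty]
  have hnd : ((PySem.List.enumerate (pvGroups areas)).map (fun x => x.1)).Nodup := by
    rw [PySem.List.map_fst_enumerate]
    exact pvRange_nodup _ _
  rw [pvDict_spec (PySem.List.enumerate (pvGroups areas)) PySem.Dict.empty hfresh hnd]
  have hempty : (PySem.Dict.empty : PySem.Dict Int Int).items = [] := rfl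
  rw [hempty, List.nil_append]
  cases hz : PySem.List.sorted
      ((PySem.List.enumerate (pvGroups areas)).map (fun p => (p.1, pvCountA p.2)))
      (fun q => q.2) true with
  | nil =>
      exfalso
      have hnil := (PySem.List.sorted_eq_nil_iff _ _ _).mp hz
      obtain ⟨a, tl, rfl⟩ := List.exists_cons_of_ne_nil hpre
      rw [pvGroups] at hnil
      simp at hnil
  | cons q t =>
      have hhead : ((PySem.List.enumerate (pvGroups areas)).map
          (fun p => (p.1, pvCountA p.2))).foldl pvMaxStep none = some q := by
        rw [← pvSorted_rev_head, hz]
        rfl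
      have hrel := pvSel_corr (pvGroups areas) (pvGroups areas) [] rfl none (none, -1)
        (show pvRel (pvGroups areas) none (none, -1) from rfl)
      simp only [List.length_nil, Nat.cast_zero] at hrel
      rw [hhead] at hrel
      obtain ⟨-, h2⟩ := hrel
      rw [h2]
      rfl
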